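-- pv_equiv track=rewrite | github.com/jjoshua2/arc_agi | dupes/e9afcf9a_group-070/test_correct/1733.py | transform
-- ===== SOURCE A (Python) =====
-- def transform(grid: list[list[int]]) -> list[list[int]]:
--     if not grid or len(grid) != 2:
--         return [row[:] for row in grid]
--
--     output = []
--     for i in range(len(grid)):
--         output.append([])
--         for j in range(len(grid[0])):
--             if j % 2 == 0:
--                 # Even columns: keep original pattern
--                 output[i].append(grid[i][j])
--             else:
--                 # Odd columns: swap rows
--                 output[i].append(grid[1 - i][j])
--
--     return output
-- ===== SOURCE B (Python) =====
-- def transform(grid: list[list[int]]) -> list[list[int]]: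
--     if not grid or len(grid) != 2:
--         return [row[:] for row in grid]
--     n = len(grid[0])
--     out = [grid[0][:n], grid[1][:n]]
--     for j in range(1, n, 2):
--         out[0][j], out[1][j] = out[1][j], out[0][j]
--     return out
-- ===== Notes on version B (the rewrite author's own statement) =====
-- stated objective: simpler
-- what changed: Instead of rebuilding both rows cell by cell with a per-cell j%2 conditional, B copies the two rows (truncated to len(grid[0])) and then swaps only the odd-column cells between them in a sparse loop over range(1, n, 2).
import Mathlib
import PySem

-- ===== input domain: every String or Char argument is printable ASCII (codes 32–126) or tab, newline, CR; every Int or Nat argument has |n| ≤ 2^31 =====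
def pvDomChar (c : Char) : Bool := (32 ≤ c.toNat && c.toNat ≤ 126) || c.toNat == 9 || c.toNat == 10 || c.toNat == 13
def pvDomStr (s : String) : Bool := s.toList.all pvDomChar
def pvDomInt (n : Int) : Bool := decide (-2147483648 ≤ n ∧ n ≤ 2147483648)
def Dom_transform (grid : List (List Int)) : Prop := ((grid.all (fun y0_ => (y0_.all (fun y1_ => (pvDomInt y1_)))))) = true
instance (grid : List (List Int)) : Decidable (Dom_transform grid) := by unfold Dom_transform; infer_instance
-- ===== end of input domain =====

-- B swaps only the odd columns between copied rows instead of rebuilding both rows cell by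
-- cell with a per-cell parity conditional; return values agree on Pre_ (A raises outside it).

-- ===== PORT A =====
def transform (grid : List (List Int)) : List (List Int) :=
  if grid = [] ∨ grid.length ≠ 2 then grid.map (fun row => row)
  else
    (PySem.List.pyRange 0 (grid.length : Int) 1).foldl (fun output i =>
      output ++
        [(PySem.List.pyRange 0 ((PySem.List.pyGetD grid 0 []).length : Int) 1).foldl
          (fun acc j =>
            if PySem.Int.mod j 2 = 0 then
              acc ++ [PySem.List.pyGetD (PySem.List.pyGetD grid i []) j 0]
            else
              acc ++ [PySem.List.pyGetD (PySem.List.pyGetD grid (1 - i) []) j 0]) []]) []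

-- ===== PORT B =====
def transform_alt (grid : List (List Int)) : List (List Int) :=
  if grid = [] ∨ grid.length ≠ 2 then grid.map (fun row => row)
  else
    let n := (PySem.List.pyGetD grid 0 []).length
    let r0 := (PySem.List.pyGetD grid 0 []).take n      -- grid[0][:n]
    let r1 := (PySem.List.pyGetD grid 1 []).take n      -- grid[1][:n]
    let p := (PySem.List.pyRange 1 (n : Int) 2).foldl
      (fun (pr : List Int × List Int) j =>
        (PySem.List.pySetD pr.1 j (PySem.List.pyGetD pr.2 j 0),
         PySem.List.pySetD pr.2 j (PySem.List.pyGetD pr.1 j 0)))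
      (r0, r1)
    [p.1, p.2]

-- ===== PRECONDITION & SPEC =====
-- Pre_ excludes two-row grids whose second row is shorter than the first: there Python A
-- raises IndexError (grid[1][j] for j < len(grid[0])), so A returns no value to match.
def Pre_transform (grid : List (List Int)) : Prop :=
  grid.length = 2 → (grid.getD 0 []).length ≤ (grid.getD 1 []).length
instance (grid : List (List Int)) : Decidable (Pre_transform grid) := by
  unfold Pre_transform; infer_instance
def pvWitness_transform : List (List Int) := [[1, 2, 3], [4, 5, 6]]
def Spec_transform (grid : List (List Int)) (out : List (List Int)) : Prop := out = transform_alt grid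
instance (grid : List (List Int)) (out : List (List Int)) : Decidable (Spec_transform grid out) := by unfold Spec_transform; infer_instance

-- ===== CLAIM (what is proved, stated in full; the proofs are below) =====
def Claim_equal_transform : Prop := ∀ (grid : List (List Int)), Dom_transform grid → Pre_transform grid → Spec_transform grid (transform grid)

-- ===== LEMMAS AND PROOFS =====

-- The swap-fold of B, read pointwise: position k holds the other row's value iff ↑k ∈ L.
theorem swap_fold_get (L : List Int) (u v : List Int)
    (hlen : u.length = v.length)
    (hL : ∀ x ∈ L, 0 ≤ x ∧ x.toNat < u.length)
    (hnd : (L.map Int.toNat).Nodup) (k : Nat) :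
    (L.foldl (fun (pr : List Int × List Int) j =>
        (PySem.List.pySetD pr.1 j (PySem.List.pyGetD pr.2 j 0),
         PySem.List.pySetD pr.2 j (PySem.List.pyGetD pr.1 j 0))) (u, v)).1[k]? =
      (if (k : Int) ∈ L then v[k]? else u[k]?) ∧
    (L.foldl (fun (pr : List Int × List Int) j =>
        (PySem.List.pySetD pr.1 j (PySem.List.pyGetD pr.2 j 0),
         PySem.List.pySetD pr.2 j (PySem.List.pyGetD pr.1 j 0))) (u, v)).2[k]? =
      (if (k : Int) ∈ L then u[k]? else v[k]?) := by
  induction L generalizing u v with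
  | nil => simp
  | cons j L ih =>
    obtain ⟨hj0, hjlt⟩ := hL j (by simp)
    have hjv : j.toNat < v.length := hlen ▸ hjlt
    have hgu : PySem.List.pyGetD u j 0 = u[j.toNat] := by
      rw [PySem.List.pyGetD_of_nonneg _ _ hj0]; exact List.getD_eq_getElem _ _ hjlt
    have hgv : PySem.List.pyGetD v j 0 = v[j.toNat] := by
      rw [PySem.List.pyGetD_of_nonneg _ _ hj0]; exact List.getD_eq_getElem _ _ hjv
    have hsu : PySem.List.pySetD u j (v[j.toNat]) = u.set j.toNat (v[j.toNat]) :=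
      PySem.List.pySetD_of_nonneg _ _ hj0
    have hsv : PySem.List.pySetD v j (u[j.toNat]) = v.set j.toNat (u[j.toNat]) :=
      PySem.List.pySetD_of_nonneg _ _ hj0
    simp only [List.foldl_cons, hgu, hgv, hsu, hsv]
    have hjnot : j.toNat ∉ L.map Int.toNat := (List.nodup_cons.mp (by simpa using hnd)).1
    have hnd' : ((L.map Int.toNat)).Nodup := (List.nodup_cons.mp (by simpa using hnd)).2
    have ih' := ih (u.set j.toNat (v[j.toNat])) (v.set j.toNat (u[j.toNat]))
      (by simp [hlen])
      (by intro x hx; have := hL x (by simp [hx]); simpa using this)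
      hnd'
    rcases ih' with ⟨ih1, ih2⟩
    constructor
    · rw [ih1]
      by_cases hkL : (k : Int) ∈ L
      · have hne : j.toNat ≠ k := by
          intro h; exact hjnot (h ▸ List.mem_map.mpr ⟨(k : Int), hkL, by simp⟩)
        simp [hkL, List.getElem?_set, hne]
      · by_cases hkj : (k : Int) = j
        · have hk : j.toNat = k := by omega
          rw [if_neg hkL, if_pos (by simp [hkj])]
          subst hk
          simp [List.getElem?_set, hjlt, List.getElem?_eq_getElem hjv]
        · have hne : j.toNat ≠ k := by omega
          have : ¬ ((k : Int) ∈ j :: L) := by simp [hkj, hkL]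
          simp [hkL, this, List.getElem?_set, hne]
    · rw [ih2]
      by_cases hkL : (k : Int) ∈ L
      · have hne : j.toNat ≠ k := by
          intro h; exact hjnot (h ▸ List.mem_map.mpr ⟨(k : Int), hkL, by simp⟩)
        simp [hkL, List.getElem?_set, hne]
      · by_cases hkj : (k : Int) = j
        · have hk : j.toNat = k := by omega
          rw [if_neg hkL, if_pos (by simp [hkj])]
          subst hk
          simp [List.getElem?_set, hjv, List.getElem?_eq_getElem hjlt]
        · have hne : j.toNat ≠ k := by omega
          have : ¬ ((k : Int) ∈ j :: L) := by simp [hkj, hkL]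
          simp [hkL, this, List.getElem?_set, hne]

theorem mem_odd_range (n : Nat) (k : Nat) :
    ((k : Int) ∈ PySem.List.pyRange 1 (n : Int) 2) ↔ (k < n ∧ k % 2 = 1) := by
  rw [PySem.List.mem_pyRange_iff_of_pos (by omega)]
  omega

-- A's inner loop for one row, as a map over the column indices.
theorem rowA_eq (r s : List Int) (n : Nat) :
    ((PySem.List.pyRange 0 (n : Int) 1).foldl
      (fun acc j =>
        if PySem.Int.mod j 2 = 0 then acc ++ [PySem.List.pyGetD r j 0]
        else acc ++ [PySem.List.pyGetD s j 0]) []) =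
    (List.range n).map (fun (k : Nat) =>
      if k % 2 = 0 then PySem.List.pyGetD r (k : Int) 0 else PySem.List.pyGetD s (k : Int) 0) := by
  have h : ∀ (acc : List Int) (j : Int),
      (if PySem.Int.mod j 2 = 0 then acc ++ [PySem.List.pyGetD r j 0]
       else acc ++ [PySem.List.pyGetD s j 0]) =
      acc ++ [if PySem.Int.mod j 2 = 0 then PySem.List.pyGetD r j 0
              else PySem.List.pyGetD s j 0] := by
    intro acc j; split <;> rfl
  rw [PySem.List.foldl_congr_mem _ _
        (fun acc j => acc ++ [if PySem.Int.mod j 2 = 0 then PySem.List.pyGetD r j 0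
              else PySem.List.pyGetD s j 0]) _ (fun acc j _ => h acc j)]
  rw [PySem.List.foldl_append_singleton_eq_map]
  rw [PySem.List.pyRange_one]
  simp only [List.map_map, Int.sub_zero, Int.toNat_natCast, List.nil_append]
  refine List.map_congr_left ?_
  intro k hk
  simp only [Function.comp_apply, zero_add]
  have hm : PySem.Int.mod (k : Int) 2 = (k : Int) % 2 := by
    simp [PySem.Int.mod, Int.fmod_eq_emod]
  rw [hm]
  have hmod : ((k : Int) % 2 = 0) ↔ (k % 2 = 0) := by omega
  by_cases hc : k % 2 = 0
  · rw [if_pos (hmod.mpr hc), if_pos hc]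
  · rw [if_neg (fun h2 => hc (hmod.mp h2)), if_neg hc]

-- ===== VERDICT (by name: the statement is the Claim_ definition above) =====
theorem transform_spec : Claim_equal_transform := by
  intro grid _ hpre
  unfold Spec_transform transform transform_alt
  by_cases hg : grid = [] ∨ grid.length ≠ 2
  · simp [hg]
  · push_neg at hg
    obtain ⟨-, hlen2⟩ := hg
    obtain ⟨a, b, rfl⟩ : ∃ a b, grid = [a, b] := by
      match grid, hlen2 with
      | [a, b], _ => exact ⟨a, b, rfl⟩
    have hab : a.length ≤ b.length := by simpa using hpre rfl
    simp only [if_neg (by simp : ¬ (([a,b] : List (List Int)) = [] ∨ ([a,b] : List (List Int)).length ≠ 2))]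
    have hg0 : PySem.List.pyGetD ([a, b] : List (List Int)) 0 [] = a := by
      simp [PySem.List.pyGetD_ofNat' ([a,b] : List (List Int)) 0 []]
    have hg1 : PySem.List.pyGetD ([a, b] : List (List Int)) 1 [] = b := by
      simp [PySem.List.pyGetD_ofNat' ([a,b] : List (List Int)) 1 []]
    have houter : PySem.List.pyRange 0 (([a,b] : List (List Int)).length : Int) 1 = [0, 1] := by
      show PySem.List.pyRange 0 ((2 : Nat) : Int) 1 = [0, 1]
      decide
    rw [houter]
    simp only [List.foldl_cons, List.foldl_nil, List.nil_append]
    have h10 : (1 : Int) - 0 = 1 := by norm_num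
    have h11 : (1 : Int) - 1 = 0 := by norm_num
    rw [h10, h11, hg0, hg1]
    set n := a.length with hn
    set L := PySem.List.pyRange 1 (n : Int) 2 with hLdef
    have hr0 : a.take n = a := by simp [hn]
    have hr1len : (b.take n).length = n := by
      rw [List.length_take]; omega
    have hlen : a.length = (b.take n).length := by omega
    have hLmem : ∀ x ∈ L, 0 ≤ x ∧ x.toNat < a.length := by
      intro x hx
      rw [hLdef, PySem.List.mem_pyRange_iff_of_pos (by omega : (0:Int) < 2)] at hx
      omega
    have hnd : (L.map Int.toNat).Nodup := by
      rw [hLdef, PySem.List.pyRange_of_pos _ _ (by omega : (0:Int) < 2)]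
      rw [List.map_map]
      have he : (Int.toNat ∘ fun k : Nat => (1 : Int) + 2 * (k : Int)) = fun k : Nat => 1 + 2 * k := by
        funext k; simp [Function.comp]; omega
      rw [he]
      exact (List.nodup_range).map (by intro x y h; simp at h; omega)
    have hs := fun k => swap_fold_get L a (b.take n) hlen hLmem hnd k
    rw [hr0, rowA_eq a b n, rowA_eq b a n]
    have e1 : (L.foldl (fun (pr : List Int × List Int) j =>
          (PySem.List.pySetD pr.1 j (PySem.List.pyGetD pr.2 j 0),
           PySem.List.pySetD pr.2 j (PySem.List.pyGetD pr.1 j 0))) (a, b.take n)).1 =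
        (List.range n).map (fun (k : Nat) =>
          if k % 2 = 0 then PySem.List.pyGetD a (k : Int) 0 else PySem.List.pyGetD b (k : Int) 0) := by
      apply List.ext_getElem?
      intro k
      rw [(hs k).1]
      rcases Nat.lt_or_ge k n with hkn | hkn
      · have hka : k < a.length := by omega
        have hkb : k < b.length := by omega
        rw [List.getElem?_map, List.getElem?_range hkn]
        by_cases ho : k % 2 = 1
        · rw [if_pos ((hLdef ▸ mem_odd_range n k).mpr ⟨hkn, ho⟩)]
          simp only [Option.map_some, if_neg (show ¬ k % 2 = 0 by omega)]
          rw [PySem.List.pyGetD_natCast, List.getElem?_take, if_pos hkn,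
            List.getElem?_eq_getElem hkb, List.getD_eq_getElem _ _ hkb]
        · rw [if_neg (fun hmm => ho ((hLdef ▸ mem_odd_range n k).mp hmm).2)]
          simp only [Option.map_some, if_pos (show k % 2 = 0 by omega)]
          rw [PySem.List.pyGetD_natCast, List.getElem?_eq_getElem hka,
            List.getD_eq_getElem _ _ hka]
      · rw [if_neg (fun hmm => by have := ((hLdef ▸ mem_odd_range n k).mp hmm).1; omega)]
        rw [List.getElem?_eq_none_iff.mpr (by omega : a.length ≤ k),
          List.getElem?_eq_none_iff.mpr (by simp; omega)]
    have e2 : (L.foldl (fun (pr : List Int × List Int) j =>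
          (PySem.List.pySetD pr.1 j (PySem.List.pyGetD pr.2 j 0),
           PySem.List.pySetD pr.2 j (PySem.List.pyGetD pr.1 j 0))) (a, b.take n)).2 =
        (List.range n).map (fun (k : Nat) =>
          if k % 2 = 0 then PySem.List.pyGetD b (k : Int) 0 else PySem.List.pyGetD a (k : Int) 0) := by
      apply List.ext_getElem?
      intro k
      rw [(hs k).2]
      rcases Nat.lt_or_ge k n with hkn | hkn
      · have hka : k < a.length := by omega
        have hkb : k < b.length := by omega
        rw [List.getElem?_map, List.getElem?_range hkn]
        by_cases ho : k % 2 = 1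
        · rw [if_pos ((hLdef ▸ mem_odd_range n k).mpr ⟨hkn, ho⟩)]
          simp only [Option.map_some, if_neg (show ¬ k % 2 = 0 by omega)]
          rw [PySem.List.pyGetD_natCast, List.getElem?_eq_getElem hka,
            List.getD_eq_getElem _ _ hka]
        · rw [if_neg (fun hmm => ho ((hLdef ▸ mem_odd_range n k).mp hmm).2)]
          simp only [Option.map_some, if_pos (show k % 2 = 0 by omega)]
          rw [PySem.List.pyGetD_natCast, List.getElem?_take, if_pos hkn,
            List.getElem?_eq_getElem hkb, List.getD_eq_getElem _ _ hkb]
      · rw [if_neg (fun hmm => by have := ((hLdef ▸ mem_odd_range n k).mp hmm).1; omega)]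
        rw [List.getElem?_eq_none_iff.mpr (by simp; omega),
          List.getElem?_eq_none_iff.mpr (by simp; omega)]
    rw [e1, e2]
    rfl
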